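-- pv_equiv track=rewrite | github.com/NutthanichN/grading-helper | week_6/6210546650_lab6.py | front_x
-- ===== SOURCE A (Python) =====
-- def front_x(list):
--     """
--     This function takes a list of strings and returns a list
--     with the strings in sorted order, except group all the
--     strings that begin with 'x' first.
--     :param list: List of <string>
--     :return: List of sorted <string> where any <string> that begins
--     with 'x' has the higher priority.
--     >>> front_x(['40','20'])
--     ['20', '40']
--     >>> front_x(['avocado','Avogadro','Bantu','bag'])
--     ['Avogadro', 'Bantu', 'avocado', 'bag']
--     >>> front_x(['Eirin', 'Xunatic', 'xade', 'Yagokoro', 'elixir'])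
--     ['Xunatic', 'xade', 'Eirin', 'Yagokoro', 'elixir']
--     >>> front_x(['Fuji','First','Xin Zhao','Last'])
--     ['Xin Zhao', 'First', 'Fuji', 'Last']
--     >>> front_x([])
--     []
--     """
--     xlist = []
--     olist = []
--     for s in list:
--         if s[0] == 'x' or s[0] == 'X':
--             xlist.append(s)
--         else:
--             olist.append(s)
--     xlist.sort()
--     olist.sort()
--     return xlist + olist
-- ===== SOURCE B (Python) =====
-- def front_x(list):
--     return sorted(list, key=lambda s: (0 if s[0] in ('x', 'X') else 1, s))
-- ===== Notes on version B (the rewrite author's own statement) =====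
-- stated objective: idiomatic
-- what changed: Replaces the two-list partition plus two separate .sort() calls with a single sorted() call using a composite (group, string) key that puts x/X-prefixed strings first.
import Mathlib
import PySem

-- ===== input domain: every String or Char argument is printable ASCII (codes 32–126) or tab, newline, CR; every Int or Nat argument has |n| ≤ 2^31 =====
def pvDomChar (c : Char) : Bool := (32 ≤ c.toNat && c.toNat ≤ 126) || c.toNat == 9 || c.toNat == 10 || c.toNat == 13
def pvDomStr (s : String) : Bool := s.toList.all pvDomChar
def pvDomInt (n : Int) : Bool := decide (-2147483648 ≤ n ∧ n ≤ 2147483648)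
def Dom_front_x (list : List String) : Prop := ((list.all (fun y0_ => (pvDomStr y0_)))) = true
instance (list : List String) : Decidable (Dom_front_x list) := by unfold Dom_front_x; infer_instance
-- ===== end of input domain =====

-- ===== PORT A =====
-- B rewrites A's two-list partition + two sorts as one sorted() call with a composite key (idiomatic; return value only).
-- shared helper: Python's  s[0] == 'x' or s[0] == 'X'  (resp.  s[0] in ('x', 'X'))
def headIsX (s : String) : Bool :=
  let c := (PySem.Str.pyGet? s 0).getD ' '
  c == 'x' || c == 'X'

def front_x (list : List String) : List String :=
  let p := list.foldl
    (fun (p : List String × List String) s =>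
      if headIsX s then (p.1 ++ [s], p.2) else (p.1, p.2 ++ [s]))
    ([], [])
  PySem.List.sorted p.1 (fun x => x) false ++ PySem.List.sorted p.2 (fun x => x) false

-- ===== PORT B =====
def front_x_alt (list : List String) : List String :=
  PySem.List.sorted2 list (fun s => if headIsX s then (0 : Int) else 1) (fun s => s) false

-- ===== PRECONDITION & SPEC =====
-- Pre_ excludes lists containing the empty string, on which Python A raises IndexError at s[0].
def Pre_front_x (list : List String) : Prop := ∀ s ∈ list, s ≠ ""
instance (list : List String) : Decidable (Pre_front_x list) := by unfold Pre_front_x; infer_instance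
def pvWitness_front_x : List String := ["xade", "Bantu", "Xin", "40"]

def Spec_front_x (list : List String) (out : List String) : Prop := out = front_x_alt list
instance (list : List String) (out : List String) : Decidable (Spec_front_x list out) := by unfold Spec_front_x; infer_instance

-- ===== CLAIM (what is proved, stated in full; the proofs are below) =====
def Claim_equal_front_x : Prop := ∀ (list : List String), Dom_front_x list → Pre_front_x list → Spec_front_x list (front_x list)

-- ===== LEMMAS AND PROOFS =====

-- the composite key B sorts by, viewed lexicographically
def lexKey (s : String) : Lex (Int × String) := toLex ((if headIsX s then (0 : Int) else 1), s)

lemma lexKey_injective : Function.Injective lexKey := by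
  intro a b h
  exact congrArg (fun p => (ofLex p).2) h

-- A's partition loop is two filters
lemma partition_foldl (l ax ao : List String) :
    l.foldl (fun (p : List String × List String) s =>
        if headIsX s then (p.1 ++ [s], p.2) else (p.1, p.2 ++ [s])) (ax, ao)
      = (ax ++ l.filter headIsX, ao ++ l.filter (fun s => !headIsX s)) := by
  induction l generalizing ax ao with
  | nil => simp
  | cons s t ih =>
    by_cases h : headIsX s = true <;>
      simp [List.foldl_cons, h, ih]

-- B's two-key sort is a one-key sort by the lexicographic pair
lemma sorted2_eq_sorted_lexKey (xs : List String) :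
    PySem.List.sorted2 xs (fun s => if headIsX s then (0 : Int) else 1) (fun s => s) false
      = PySem.List.sorted xs lexKey false := by
  unfold PySem.List.sorted2 PySem.List.sorted
  have hb : (fun a b : String =>
        decide ((if headIsX a then (0 : Int) else 1) < (if headIsX b then (0 : Int) else 1)) ||
          !decide ((if headIsX b then (0 : Int) else 1) < (if headIsX a then (0 : Int) else 1)) &&
            decide (a < b))
      = fun a b : String => decide (lexKey a < lexKey b) := by
    funext a b
    rw [Bool.eq_iff_iff]
    simp only [Bool.or_eq_true, Bool.and_eq_true, Bool.not_eq_eq_eq_not, Bool.not_true,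
      decide_eq_true_eq, decide_eq_false_iff_not, lexKey, Prod.Lex.lt_iff, ofLex_toLex]
    constructor
    · rintro (h | ⟨h1, h2⟩)
      · exact Or.inl h
      · rcases lt_trichotomy (if headIsX a then (0 : Int) else 1)
          (if headIsX b then (0 : Int) else 1) with h3 | h3 | h3
        · exact Or.inl h3
        · exact Or.inr ⟨h3, h2⟩
        · exact absurd h3 h1
    · rintro (h | ⟨h1, h2⟩)
      · exact Or.inl h
      · exact Or.inr ⟨by rw [h1]; exact lt_irrefl _, h2⟩
  rw [hb]

lemma pairwise_front_x (l : List String) :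
    List.Pairwise (fun a b => lexKey a ≤ lexKey b) (front_x l) := by
  unfold front_x
  rw [partition_foldl, List.nil_append, List.nil_append]
  apply List.pairwise_append.mpr
  refine ⟨?_, ?_, ?_⟩
  · refine (PySem.List.sorted_pairwise (l.filter headIsX) (fun x => x)).imp_of_mem ?_
    intro a b ha hb hab
    rw [PySem.List.mem_sorted] at ha hb
    have ha' := (List.mem_filter.mp ha).2
    have hb' := (List.mem_filter.mp hb).2
    rw [Prod.Lex.le_iff]
    exact Or.inr (by simp [lexKey, ha', hb', hab])
  · refine (PySem.List.sorted_pairwise (l.filter (fun s => !headIsX s)) (fun x => x)).imp_of_mem ?_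
    intro a b ha hb hab
    rw [PySem.List.mem_sorted] at ha hb
    have ha' := (List.mem_filter.mp ha).2
    have hb' := (List.mem_filter.mp hb).2
    simp only [Bool.not_eq_eq_eq_not, Bool.not_true] at ha' hb'
    rw [Prod.Lex.le_iff]
    exact Or.inr (by simp [lexKey, ha', hb', hab])
  · intro a ha b hb
    rw [PySem.List.mem_sorted] at ha hb
    have ha' := (List.mem_filter.mp ha).2
    have hb' := (List.mem_filter.mp hb).2
    simp only [Bool.not_eq_eq_eq_not, Bool.not_true] at hb'
    rw [Prod.Lex.le_iff]
    exact Or.inl (by simp [lexKey, ha', hb'])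

lemma perm_front_x (l : List String) : (front_x l).Perm l := by
  unfold front_x
  rw [partition_foldl, List.nil_append, List.nil_append]
  exact ((PySem.List.sorted_perm _ _ _).append (PySem.List.sorted_perm _ _ _)).trans
    (List.filter_append_perm _ l)

lemma perm_front_x_alt (l : List String) : (front_x_alt l).Perm l := by
  unfold front_x_alt
  exact PySem.List.sorted2_perm _ _ _ _

-- ===== VERDICT (by name: the statement is the Claim_ definition above) =====
theorem front_x_spec : Claim_equal_front_x := by
  intro l _ _
  unfold Spec_front_x
  refine PySem.List.eq_of_perm_of_pairwise_le_of_injective lexKey lexKey_injective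
    ((perm_front_x l).trans (perm_front_x_alt l).symm) (pairwise_front_x l) ?_
  unfold front_x_alt
  rw [sorted2_eq_sorted_lexKey]
  exact PySem.List.sorted_pairwise l lexKey
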